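-- pv_equiv track=rewrite | github.com/bhanurekapalli/data_structures_practice | lexographically_small.py | solve
-- ===== SOURCE A (Python) =====
-- def solve(S):
--     K=2
--     N = len(S)
--
--     # Stores the minimum subsequence
--     answer = []
--
--     # Traverse the string S
--     for i in range(N):
--
--         # If the stack is empty
--         if (len(answer) == 0):
--             answer.append(S[i])
--         else:
--
--             # Iterate till the current
--             # character is less than the
--             # the character at the top of stack
--             while (len(answer) > 0 and (S[i] < answer[len(answer) - 1]) and (len(answer) - 1 + N - i >= K)):
--                 answer = answer[:-1]
--
--             # If stack size is < K
--             if (len(answer) == 0 or len(answer) < K):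
--                 # Push the current
--                 # character into it
--                 answer.append(S[i])
--
--     # Stores the resultant string
--     ret = []
--
--     # Iterate until stack is empty
--     while (len(answer) > 0):
--         ret.append(answer[len(answer) - 1])
--         answer = answer[:-1]
--
--     # Reverse the string
--     ret = ret[::-1]
--     ret = ''.join(ret)
--
--     # Print the string
--     return ret
-- ===== SOURCE B (Python) =====
-- def solve(S):
--     if len(S) < 2:
--         return S
--     prefix = S[:-1]
--     c1 = min(prefix)
--     i = prefix.index(c1)
--     c2 = min(S[i+1:])
--     return c1 + c2
-- ===== Notes on version B (the rewrite author's own statement) =====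
-- stated objective: faster
-- what changed: Replaces the monotonic stack (per-character pop loop plus final pop-and-reverse pass) with two direct min-scans that exploit K=2: the earliest minimum of S[:-1] becomes the first character and the minimum of the suffix after it the second.
import Mathlib
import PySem

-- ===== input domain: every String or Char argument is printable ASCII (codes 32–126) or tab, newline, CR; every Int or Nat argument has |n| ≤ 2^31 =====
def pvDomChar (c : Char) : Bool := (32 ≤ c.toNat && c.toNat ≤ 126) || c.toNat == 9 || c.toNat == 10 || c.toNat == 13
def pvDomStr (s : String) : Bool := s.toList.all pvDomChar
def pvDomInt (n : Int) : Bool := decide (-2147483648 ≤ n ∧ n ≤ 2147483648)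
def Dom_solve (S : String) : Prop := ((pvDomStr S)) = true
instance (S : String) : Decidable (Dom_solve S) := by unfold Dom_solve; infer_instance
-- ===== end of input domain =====

-- B replaces A's monotonic-stack loop (pops + final reversal) with two direct min-scans
-- exploiting K = 2: the earliest minimum of S[:-1], then the minimum of the remaining suffix.

-- ===== PORT A =====
-- the inner `while` that pops the stack top: answer = answer[:-1]
def popLoop (N i : Int) (c : Char) (ans : List Char) : List Char :=
  if _h : ans.length > 0 ∧ c < ans.getLast! ∧ (ans.length : Int) - 1 + N - i ≥ 2 then
    popLoop N i c ans.dropLast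
  else ans
termination_by ans.length
decreasing_by simp only [List.length_dropLast]; omega

-- one iteration of the `for i in range(N)` loop body
def stepA (S : String) (N : Int) (answer : List Char) (i : Int) : List Char :=
  match PySem.Str.pyGet? S i with
  | none => answer        -- unreachable: i ∈ range(N) is always in range
  | some c =>
    if answer.length = 0 then answer ++ [c]
    else
      let answer2 := popLoop N i c answer
      if answer2.length = 0 ∨ answer2.length < 2 then answer2 ++ [c] else answer2

-- the final `while` collecting the stack tops into ret
def retLoop (ans ret : List Char) : List Char :=
  if ans.length > 0 then retLoop ans.dropLast (ret ++ [ans.getLast!]) else ret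
termination_by ans.length
decreasing_by simp only [List.length_dropLast]; omega

def solve (S : String) : String :=
  let N : Int := PySem.Str.len S
  let answer := (PySem.List.pyRange 0 N 1).foldl (stepA S N) []
  let ret := retLoop answer []
  String.ofList ret.reverse   -- ret = ret[::-1]; return ''.join(ret)

-- ===== PORT B =====
def solve_alt (S : String) : String :=
  if PySem.Str.len S < 2 then S
  else
    let cs := S.toList
    let pre := PySem.List.slice cs none (some (-1))          -- S[:-1]
    match PySem.List.min? pre (fun x => x) with              -- min(prefix)
    | none => ""                                             -- unreachable: pre ≠ []
    | some c1 =>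
      match PySem.List.index? pre c1 with                    -- prefix.index(c1)
      | none => ""                                           -- unreachable: c1 ∈ pre
      | some i =>
        match PySem.List.min? (PySem.List.slice cs (some ((i : Int) + 1)) none)
            (fun x => x) with                                -- min(S[i+1:])
        | none => ""                                         -- unreachable
        | some c2 => String.ofList [c1, c2]

-- ===== PRECONDITION & SPEC =====
def Spec_solve (S : String) (out : String) : Prop := out = solve_alt S
instance (S : String) (out : String) : Decidable (Spec_solve S out) := by unfold Spec_solve; infer_instance

-- ===== CLAIM (what is proved, stated in full; the proofs are below) =====
def Claim_equal_solve : Prop := ∀ (S : String), Dom_solve S → Spec_solve S (solve S)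

-- ===== LEMMAS AND PROOFS =====
theorem getLast!_concat (as : List Char) (a : Char) : (as ++ [a]).getLast! = a := by
  induction as with
  | nil => rfl
  | cons x t ih => simp [List.getLast!]

theorem popLoop_nil (N i : Int) (c : Char) : popLoop N i c [] = [] := by
  rw [popLoop]; simp

theorem popLoop_one (N i : Int) (c m : Char) :
    popLoop N i c [m] = if c < m ∧ N - i ≥ 2 then [] else [m] := by
  have hg : ([m] : List Char).getLast! = m := rfl
  rw [popLoop]
  by_cases hc : c < m
  · by_cases hN : N - i ≥ 2
    · rw [dif_pos ⟨by simp, by rw [hg]; exact hc, by simp; omega⟩]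
      simp [popLoop_nil, hc, hN]
    · rw [dif_neg (by rintro ⟨-, -, h3⟩; simp at h3; omega)]
      simp [hN]
  · rw [dif_neg (by rintro ⟨-, h2, -⟩; rw [hg] at h2; exact hc h2)]
    simp [hc]

theorem popLoop_two (N i : Int) (c m m2 : Char) :
    popLoop N i c [m, m2] = if c < m2 ∧ 1 + N - i ≥ 2 then popLoop N i c [m] else [m, m2] := by
  have hg : ([m, m2] : List Char).getLast! = m2 := rfl
  rw [popLoop]
  by_cases hc : c < m2
  · by_cases hN : 1 + N - i ≥ 2
    · rw [dif_pos ⟨by simp, by rw [hg]; exact hc, by simp; omega⟩]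
      simp only [List.dropLast]
      rw [if_pos ⟨hc, hN⟩]
    · rw [dif_neg (by rintro ⟨-, -, h3⟩; simp at h3; omega)]
      simp [hN]
  · rw [dif_neg (by rintro ⟨-, h2, -⟩; rw [hg] at h2; exact hc h2)]
    simp [hc]

theorem pyGet_toList (S : String) (i : Nat) (hi : i < S.toList.length) :
    PySem.Str.pyGet? S (i : Int) = some S.toList[i] := by
  simp [PySem.Str.pyGet?, List.getElem?_eq_getElem hi]

theorem stepA_one (S : String) (i : Nat) (hi : i < S.toList.length) (m : Char) :
    stepA S (PySem.Str.len S) [m] (i : Int) =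
      if S.toList[i] < m ∧ (PySem.Str.len S) - i ≥ 2 then [S.toList[i]]
      else [m, S.toList[i]] := by
  rw [stepA, pyGet_toList S i hi]
  simp only [List.length_cons, List.length_nil]
  rw [if_neg (by omega), popLoop_one]
  split
  · simp
  · norm_num

theorem stepA_two (S : String) (i : Nat) (hi : i < S.toList.length) (m m2 : Char) :
    stepA S (PySem.Str.len S) [m, m2] (i : Int) =
      if S.toList[i] < m2 ∧ 1 + (PySem.Str.len S) - i ≥ 2 then
        (if S.toList[i] < m ∧ (PySem.Str.len S) - i ≥ 2 then [S.toList[i]]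
         else [m, S.toList[i]])
      else [m, m2] := by
  rw [stepA, pyGet_toList S i hi]
  simp only [List.length_cons, List.length_nil]
  rw [if_neg (by omega), popLoop_two]
  split
  · rw [popLoop_one]; split
    · simp
    · norm_num
  · norm_num

def minOf : List Char → Char
  | [] => default
  | x :: t => t.foldl min x

theorem foldl_min_le (t : List Char) (x : Char) :
    t.foldl min x ≤ x ∧ ∀ y ∈ t, t.foldl min x ≤ y := by
  induction t generalizing x with
  | nil => simp
  | cons a t ih =>
    obtain ⟨h1, h2⟩ := ih (min x a)
    refine ⟨le_trans h1 (min_le_left _ _), ?_⟩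
    intro y hy
    rcases List.mem_cons.mp hy with rfl | hy
    · exact le_trans h1 (min_le_right _ _)
    · exact h2 y hy

theorem minOf_le (l : List Char) (x : Char) (hx : x ∈ l) : minOf l ≤ x := by
  cases l with
  | nil => cases hx
  | cons a t =>
    rcases List.mem_cons.mp hx with rfl | hx
    · exact (foldl_min_le t x).1
    · exact (foldl_min_le t a).2 x hx

theorem minOf_mem (l : List Char) (h : l ≠ []) : minOf l ∈ l := by
  cases l with
  | nil => exact absurd rfl h
  | cons a t =>
    show t.foldl min a ∈ a :: t
    clear h
    induction t generalizing a with
    | nil => simp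
    | cons b t ih =>
      have := ih (min a b)
      simp only [List.foldl_cons]
      rcases List.mem_cons.mp this with h | h
      · rw [h]; rcases min_choice a b with hm | hm <;> simp [hm]
      · simp [h]

theorem minOf_append (p : List Char) (c : Char) (h : p ≠ []) :
    minOf (p ++ [c]) = min (minOf p) c := by
  cases p with
  | nil => exact absurd rfl h
  | cons a t => show (t ++ [c]).foldl min a = _; rw [List.foldl_append]; rfl

theorem idxOf?_of_mem (l : List Char) (c : Char) (h : c ∈ l) :
    List.idxOf? c l = some (List.idxOf c l) := by
  cases hk : List.idxOf? c l with
  | none => exact absurd (List.idxOf?_eq_none_iff.mp hk) (by simp [h])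
  | some k => rw [List.idxOf_eq_getD_idxOf?, hk]; rfl

def stackAt (cs : List Char) (i : Nat) : List Char :=
  if List.idxOf (minOf (cs.take (i+1))) (cs.take (i+1)) = i then [minOf (cs.take (i+1))]
  else [minOf (cs.take (i+1)),
        minOf ((cs.take (i+1)).drop (List.idxOf (minOf (cs.take (i+1))) (cs.take (i+1)) + 1))]

def foldA (S : String) (k : Nat) : List Char :=
  ((List.range k).map (fun j => Int.ofNat j)).foldl (stepA S (PySem.Str.len S)) []

theorem foldA_succ (S : String) (k : Nat) :
    foldA S (k+1) = stepA S (PySem.Str.len S) (foldA S k) (k : Int) := by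
  unfold foldA; rw [List.range_succ]; simp

theorem stackAt_pos (cs : List Char) (i : Nat)
    (h : List.idxOf (minOf (cs.take (i+1))) (cs.take (i+1)) = i) :
    stackAt cs i = [minOf (cs.take (i+1))] := by
  unfold stackAt; rw [if_pos h]

theorem stackAt_neg (cs : List Char) (i : Nat)
    (h : ¬ List.idxOf (minOf (cs.take (i+1))) (cs.take (i+1)) = i) :
    stackAt cs i = [minOf (cs.take (i+1)),
      minOf ((cs.take (i+1)).drop (List.idxOf (minOf (cs.take (i+1))) (cs.take (i+1)) + 1))] := by
  unfold stackAt; rw [if_neg h]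

-- the generic step: from stackAt cs i to stackAt cs (i+1), for a non-final index i+1
theorem step_stackAt (S : String) (i : Nat) (hi : i + 3 ≤ S.toList.length) :
    stepA S (PySem.Str.len S) (stackAt S.toList i) ((i+1 : Nat) : Int) =
      stackAt S.toList (i+1) := by
  have hi1 : i + 1 < S.toList.length := by omega
  have hlen : (S.toList.take (i+1)).length = i + 1 := by rw [List.length_take]; omega
  have hpne : S.toList.take (i+1) ≠ [] := by
    intro h; rw [h] at hlen; simp at hlen
  have hps : S.toList.take (i+1+1) = S.toList.take (i+1) ++ [S.toList[i+1]] := by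
    rw [← List.take_concat_get hi1]; simp
  have hmem : minOf (S.toList.take (i+1)) ∈ S.toList.take (i+1) := minOf_mem _ hpne
  have hjlt : List.idxOf (minOf (S.toList.take (i+1))) (S.toList.take (i+1)) < i + 1 := by
    have := List.idxOf_lt_length_of_mem hmem; omega
  have hN2 : PySem.Str.len S - ((i+1 : Nat) : Int) ≥ 2 := by
    rw [PySem.Str.len_eq]; push_cast; omega
  have hN1 : 1 + PySem.Str.len S - ((i+1 : Nat) : Int) ≥ 2 := by
    rw [PySem.Str.len_eq]; push_cast; omega
  by_cases hij : List.idxOf (minOf (S.toList.take (i+1))) (S.toList.take (i+1)) = i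
  · rw [stackAt_pos S.toList i hij, stepA_one S (i+1) hi1]
    by_cases hcm : S.toList[i+1] < minOf (S.toList.take (i+1))
    · rw [if_pos ⟨hcm, hN2⟩]
      have hminp' : minOf (S.toList.take (i+1+1)) = S.toList[i+1] := by
        rw [hps, minOf_append _ _ hpne]; exact min_eq_right hcm.le
      have hcnp : S.toList[i+1] ∉ S.toList.take (i+1) :=
        fun hmem' => absurd (minOf_le _ _ hmem') (not_le.mpr hcm)
      rw [stackAt_pos S.toList (i+1)
        (by rw [hminp', hps, List.idxOf_append, if_neg hcnp]; simp [hlen]),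
        hminp']
    · rw [if_neg (fun hand => hcm hand.1)]
      have hmc : minOf (S.toList.take (i+1)) ≤ S.toList[i+1] := not_lt.mp hcm
      have hminp' : minOf (S.toList.take (i+1+1)) = minOf (S.toList.take (i+1)) := by
        rw [hps, minOf_append _ _ hpne]; exact min_eq_left hmc
      have hidx : List.idxOf (minOf (S.toList.take (i+1+1))) (S.toList.take (i+1+1)) = i := by
        rw [hminp', hps, List.idxOf_append, if_pos hmem, hij]
      rw [stackAt_neg S.toList (i+1) (by rw [hidx]; omega), hidx, hminp']
      rw [hps, List.drop_append_of_le_length (by omega),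
        show (S.toList.take (i+1)).drop (i+1) = [] from List.drop_eq_nil_iff.mpr (by omega)]
      rfl
  · have hsubne :
        (S.toList.take (i+1)).drop
          (List.idxOf (minOf (S.toList.take (i+1))) (S.toList.take (i+1)) + 1) ≠ [] := by
      intro h; rw [List.drop_eq_nil_iff, hlen] at h; omega
    have hmm2 : minOf (S.toList.take (i+1)) ≤
        minOf ((S.toList.take (i+1)).drop
          (List.idxOf (minOf (S.toList.take (i+1))) (S.toList.take (i+1)) + 1)) :=
      minOf_le _ _ (List.mem_of_mem_drop (minOf_mem _ hsubne))
    rw [stackAt_neg S.toList i hij, stepA_two S (i+1) hi1]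
    by_cases hcm2 : S.toList[i+1] <
        minOf ((S.toList.take (i+1)).drop
          (List.idxOf (minOf (S.toList.take (i+1))) (S.toList.take (i+1)) + 1))
    · rw [if_pos ⟨hcm2, hN1⟩]
      by_cases hcm : S.toList[i+1] < minOf (S.toList.take (i+1))
      · rw [if_pos ⟨hcm, hN2⟩]
        have hminp' : minOf (S.toList.take (i+1+1)) = S.toList[i+1] := by
          rw [hps, minOf_append _ _ hpne]; exact min_eq_right hcm.le
        have hcnp : S.toList[i+1] ∉ S.toList.take (i+1) :=
          fun hmem' => absurd (minOf_le _ _ hmem') (not_le.mpr hcm)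
        rw [stackAt_pos S.toList (i+1)
          (by rw [hminp', hps, List.idxOf_append, if_neg hcnp]; simp [hlen]),
          hminp']
      · rw [if_neg (fun hand => hcm hand.1)]
        have hmc : minOf (S.toList.take (i+1)) ≤ S.toList[i+1] := not_lt.mp hcm
        have hminp' : minOf (S.toList.take (i+1+1)) = minOf (S.toList.take (i+1)) := by
          rw [hps, minOf_append _ _ hpne]; exact min_eq_left hmc
        have hidx : List.idxOf (minOf (S.toList.take (i+1+1))) (S.toList.take (i+1+1)) =
            List.idxOf (minOf (S.toList.take (i+1))) (S.toList.take (i+1)) := by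
          rw [hminp', hps, List.idxOf_append, if_pos hmem]
        rw [stackAt_neg S.toList (i+1) (by rw [hidx]; omega), hidx, hminp']
        rw [hps, List.drop_append_of_le_length (by omega), minOf_append _ _ hsubne,
          min_eq_right hcm2.le]
    · rw [if_neg (fun hand => hcm2 hand.1)]
      have hmc : minOf (S.toList.take (i+1)) ≤ S.toList[i+1] :=
        le_trans hmm2 (not_lt.mp hcm2)
      have hminp' : minOf (S.toList.take (i+1+1)) = minOf (S.toList.take (i+1)) := by
        rw [hps, minOf_append _ _ hpne]; exact min_eq_left hmc
      have hidx : List.idxOf (minOf (S.toList.take (i+1+1))) (S.toList.take (i+1+1)) =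
          List.idxOf (minOf (S.toList.take (i+1))) (S.toList.take (i+1)) := by
        rw [hminp', hps, List.idxOf_append, if_pos hmem]
      rw [stackAt_neg S.toList (i+1) (by rw [hidx]; omega), hidx, hminp']
      rw [hps, List.drop_append_of_le_length (by omega), minOf_append _ _ hsubne,
        min_eq_left (not_lt.mp hcm2)]

theorem stackAt_zero (cs : List Char) (h : 0 < cs.length) : stackAt cs 0 = [cs[0]] := by
  cases cs with
  | nil => simp at h
  | cons a t =>
    unfold stackAt
    simp [minOf]

theorem inv (S : String) (i : Nat) (hi : i + 2 ≤ S.toList.length) :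
    foldA S (i+1) = stackAt S.toList i := by
  induction i with
  | zero =>
    rw [foldA_succ]
    have h0 : 0 < S.toList.length := by omega
    show stepA S (PySem.Str.len S) (foldA S 0) ((0:Nat) : Int) = _
    rw [show foldA S 0 = [] from rfl, stepA, pyGet_toList S 0 h0]
    simp only [List.length_nil, List.nil_append, if_true]
    rw [stackAt_zero S.toList h0]
  | succ i ih =>
    rw [foldA_succ, ih (by omega)]
    exact step_stackAt S i (by omega)

theorem foldA_last (S : String) (h2 : 2 ≤ S.toList.length) :
    foldA S S.toList.length =
      [minOf S.toList.dropLast,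
       minOf (S.toList.drop (List.idxOf (minOf S.toList.dropLast) S.toList.dropLast + 1))] := by
  obtain ⟨k, hk⟩ : ∃ k, S.toList.length = k + 1 + 1 := ⟨S.toList.length - 2, by omega⟩
  rw [hk, foldA_succ, inv S k (by omega)]
  have hi1 : k + 1 < S.toList.length := by omega
  have hlen : (S.toList.take (k+1)).length = k + 1 := by rw [List.length_take]; omega
  have hpne : S.toList.take (k+1) ≠ [] := by intro h; rw [h] at hlen; simp at hlen
  have hdl : S.toList.dropLast = S.toList.take (k+1) := by
    rw [List.dropLast_eq_take, hk]
    norm_num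
  have hps : S.toList = S.toList.take (k+1) ++ [S.toList[k+1]] := by
    conv_lhs => rw [← List.take_length (l := S.toList), hk, ← List.take_concat_get hi1]
    simp
  have hmem : minOf (S.toList.take (k+1)) ∈ S.toList.take (k+1) := minOf_mem _ hpne
  have hjlt : List.idxOf (minOf (S.toList.take (k+1))) (S.toList.take (k+1)) < k + 1 := by
    have := List.idxOf_lt_length_of_mem hmem; omega
  have hN1 : 1 + PySem.Str.len S - ((k+1 : Nat) : Int) ≥ 2 := by
    rw [PySem.Str.len_eq, hk]; push_cast; omega
  have hNn2 : ¬ (PySem.Str.len S - ((k+1 : Nat) : Int) ≥ 2) := by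
    rw [PySem.Str.len_eq, hk]; push_cast; omega
  rw [hdl]
  by_cases hij : List.idxOf (minOf (S.toList.take (k+1))) (S.toList.take (k+1)) = k
  · rw [stackAt_pos S.toList k hij, stepA_one S (k+1) hi1, if_neg (fun hand => hNn2 hand.2), hij]
    have hdropfull : S.toList.drop (k+1) = [S.toList[k+1]] := by
      have h := List.drop_append_of_le_length (l₁ := S.toList.take (k+1))
        (l₂ := [S.toList[k+1]]) (i := k+1) (by omega)
      rw [← hps] at h
      rw [h, show (S.toList.take (k+1)).drop (k+1) = [] from List.drop_eq_nil_iff.mpr (by omega)]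
      rfl
    rw [hdropfull]
    rfl
  · have hsubne :
        (S.toList.take (k+1)).drop
          (List.idxOf (minOf (S.toList.take (k+1))) (S.toList.take (k+1)) + 1) ≠ [] := by
      intro h; rw [List.drop_eq_nil_iff, hlen] at h; omega
    have hdrop :
        S.toList.drop (List.idxOf (minOf (S.toList.take (k+1))) (S.toList.take (k+1)) + 1) =
          (S.toList.take (k+1)).drop
            (List.idxOf (minOf (S.toList.take (k+1))) (S.toList.take (k+1)) + 1) ++
            [S.toList[k+1]] := by
      have h := List.drop_append_of_le_length (l₁ := S.toList.take (k+1))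
        (l₂ := [S.toList[k+1]])
        (i := List.idxOf (minOf (S.toList.take (k+1))) (S.toList.take (k+1)) + 1) (by omega)
      rw [← hps] at h
      exact h
    rw [stackAt_neg S.toList k hij, stepA_two S (k+1) hi1]
    by_cases hcm2 : S.toList[k+1] <
        minOf ((S.toList.take (k+1)).drop
          (List.idxOf (minOf (S.toList.take (k+1))) (S.toList.take (k+1)) + 1))
    · rw [if_pos ⟨hcm2, hN1⟩, if_neg (fun hand => hNn2 hand.2)]
      rw [hdrop, minOf_append _ _ hsubne, min_eq_right hcm2.le]
    · rw [if_neg (fun hand => hcm2 hand.1)]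
      rw [hdrop, minOf_append _ _ hsubne, min_eq_left (not_lt.mp hcm2)]

theorem retLoop_spec (ans : List Char) : ∀ ret, retLoop ans ret = ret ++ ans.reverse := by
  induction ans using List.reverseRecOn with
  | nil => intro ret; rw [retLoop]; simp
  | append_singleton as a ih =>
    intro ret
    rw [retLoop]
    have h1 : (as ++ [a]).dropLast = as := by simp
    rw [getLast!_concat]
    simp only [h1, List.length_append, List.length_cons]
    rw [if_pos (by omega), ih]
    simp

theorem solve_eq_foldA (S : String) : solve S = String.ofList (foldA S S.toList.length) := by
  show String.ofList (retLoop ((PySem.List.pyRange 0 (PySem.Str.len S) 1).foldl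
    (stepA S (PySem.Str.len S)) []) []).reverse = _
  unfold foldA
  rw [PySem.Str.len_eq, PySem.List.pyRange_one, retLoop_spec]
  simp only [List.nil_append, List.reverse_reverse, Int.sub_zero,
    Int.toNat_natCast, zero_add, Int.ofNat_eq_natCast]

theorem min?_eq_minOf (l : List Char) (hl : l ≠ []) :
    PySem.List.min? l (fun x => x) = some (minOf l) := by
  cases l with
  | nil => exact absurd rfl hl
  | cons x t => rw [PySem.List.min?_id_cons]; rfl

theorem solve_alt_big (S : String) (h2 : 2 ≤ S.toList.length) :
    solve_alt S = String.ofList [minOf S.toList.dropLast,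
      minOf (S.toList.drop (List.idxOf (minOf S.toList.dropLast) S.toList.dropLast + 1))] := by
  show (if PySem.Str.len S < 2 then S else _) = _
  rw [if_neg (by rw [PySem.Str.len_eq]; exact not_lt.mpr (by exact_mod_cast h2))]
  show (match PySem.List.min? (PySem.List.slice S.toList none (some (-1))) (fun x => x) with
    | none => ""
    | some c1 =>
      match PySem.List.index? (PySem.List.slice S.toList none (some (-1))) c1 with
      | none => ""
      | some i =>
        match PySem.List.min? (PySem.List.slice S.toList (some ((i : Int) + 1)) none)
            (fun x => x) with
        | none => ""
        | some c2 => String.ofList [c1, c2]) = _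
  rw [PySem.List.slice_to_neg_one]
  have hlend : S.toList.dropLast.length = S.toList.length - 1 := List.length_dropLast
  have hdne : S.toList.dropLast ≠ [] := by
    intro h; rw [h] at hlend; simp only [List.length_nil] at hlend; omega
  rw [min?_eq_minOf _ hdne]
  simp only []
  rw [PySem.List.index?_eq_idxOf?, idxOf?_of_mem _ _ (minOf_mem _ hdne)]
  simp only []
  have hjlt : List.idxOf (minOf S.toList.dropLast) S.toList.dropLast < S.toList.dropLast.length :=
    List.idxOf_lt_length_of_mem (minOf_mem _ hdne)
  have hj1 : ((List.idxOf (minOf S.toList.dropLast) S.toList.dropLast : Nat) : Int) + 1 =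
      ((List.idxOf (minOf S.toList.dropLast) S.toList.dropLast + 1 : Nat) : Int) := by
    push_cast; ring
  rw [hj1, PySem.List.slice_from_natCast]
  have hdne2 : S.toList.drop (List.idxOf (minOf S.toList.dropLast) S.toList.dropLast + 1) ≠ [] := by
    rw [Ne, List.drop_eq_nil_iff]; omega
  rw [min?_eq_minOf _ hdne2]

theorem foldA_one (S : String) (h : 1 ≤ S.toList.length) : foldA S 1 = [S.toList[0]] := by
  rw [show (1:Nat) = 0 + 1 from rfl, foldA_succ, show foldA S 0 = [] from rfl, stepA,
    pyGet_toList S 0 (by omega)]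
  simp only []
  rw [if_pos (show ([] : List Char).length = 0 from rfl)]
  exact List.nil_append _

theorem solve_main (S : String) : solve S = solve_alt S := by
  rcases Nat.lt_or_ge S.toList.length 2 with h | h
  · have hc : S.toList.length = 0 ∨ S.toList.length = 1 := by omega
    rcases hc with h0 | h1
    · rw [solve_eq_foldA, h0, show foldA S 0 = [] from rfl]
      unfold solve_alt
      rw [if_pos (by rw [PySem.Str.len_eq, h0]; norm_num)]
      have : S.toList = [] := List.length_eq_zero_iff.mp h0
      conv_rhs => rw [← String.ofList_toList (s := S), this]
    · rw [solve_eq_foldA, h1, foldA_one S (by omega)]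
      unfold solve_alt
      rw [if_pos (by rw [PySem.Str.len_eq, h1]; norm_num)]
      obtain ⟨a, ha⟩ := List.length_eq_one_iff.mp h1
      simp only [ha, List.getElem_cons_zero]
      rw [← String.ofList_toList (s := S), ha]
  · rw [solve_eq_foldA, foldA_last S h, solve_alt_big S h]

-- ===== VERDICT (by name: the statement is the Claim_ definition above) =====
theorem solve_spec : Claim_equal_solve := by
  intro S _
  exact solve_main S
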